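-- pv_equiv track=rewrite | github.com/Davies-Sam/Genetris | heuristics.py | MaxWell
-- ===== SOURCE A (Python) =====
-- def ColumnHeight(board, col):
--     """#returns the heights a single column"""
--     height = len(board) -1
--     width = len(board[1])
--     #for every row in the column check for non empty board block
--     for x in range (0, height):
--         if(board[x][col] != 0):
--             return height - x
--     return 0
--
-- def MaxWell(board):
--     """returns the depth of the biggest well"""
--     height = len(board) - 1
--     width = len(board[1])
--     coords = {}
--
--     for row, rowElements in enumerate(board):
--         for x in range(0, len(rowElements)):
--             coords[(x,row)] = rowElements[x]
--     wellMap = {0 : 0, 1 : 0, 2 : 0, 3 : 0, 4 : 0, 5 : 0, 6 : 0, 7 : 0, 8 : 0, 9 : 0}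
--     wells = 0
--     for row, rowElements in enumerate(board):
--         for x in range(0,len(rowElements)):
--             #if the height of the column is > height of 0 cell, we know we have a hole
--             if rowElements[x] == 0:
--                 if x > 0 and x < 9:
--                     if (rowElements[x-1] != 0 and rowElements[x+1] != 0) and ColumnHeight(board, x) < (height - row):
--                         wells +=1
--                         wellMap[x] += 1
--                 elif x==0:
--                     if rowElements[x+1] != 0 and ColumnHeight(board, x) < (height - row):
--                         wells +=1
--                         wellMap[x] += 1
--                 elif x==9:
--                     if rowElements[x-1] != 0 and ColumnHeight(board, x) < (height - row):
--                         wells +=1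
--                         wellMap[x] += 1
--     return max(wellMap.values())
-- ===== SOURCE B (Python) =====
-- def MaxWell(board):
--     """returns the depth of the biggest well"""
--     height = len(board) - 1
--     # each column's height (as ColumnHeight computes it), found once up front
--     tops = []
--     for c in range(10):
--         t = 0
--         for r in range(height):
--             if c < len(board[r]) and board[r][c] != 0:
--                 t = height - r
--                 break
--         tops.append(t)
--     wells = [0] * 10
--     for i, row in enumerate(board):
--         for x in range(len(row)):
--             if row[x] == 0 and x <= 9 and tops[x] < height - i:
--                 if x == 0:
--                     ok = len(row) > 1 and row[1] != 0
--                 elif x == 9: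
--                     ok = row[8] != 0
--                 else:
--                     ok = row[x - 1] != 0 and x + 1 < len(row) and row[x + 1] != 0
--                 if ok:
--                     wells[x] += 1
--     return max(wells)
-- ===== Notes on version B (the rewrite author's own statement) =====
-- stated objective: faster
-- what changed: B drops the unused coords dict and the per-empty-cell ColumnHeight rescan: it precomputes the ten column heights once into a lookup table and counts well cells in a single pass over the board, keeping per-column counters in a plain list.
import Mathlib
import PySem

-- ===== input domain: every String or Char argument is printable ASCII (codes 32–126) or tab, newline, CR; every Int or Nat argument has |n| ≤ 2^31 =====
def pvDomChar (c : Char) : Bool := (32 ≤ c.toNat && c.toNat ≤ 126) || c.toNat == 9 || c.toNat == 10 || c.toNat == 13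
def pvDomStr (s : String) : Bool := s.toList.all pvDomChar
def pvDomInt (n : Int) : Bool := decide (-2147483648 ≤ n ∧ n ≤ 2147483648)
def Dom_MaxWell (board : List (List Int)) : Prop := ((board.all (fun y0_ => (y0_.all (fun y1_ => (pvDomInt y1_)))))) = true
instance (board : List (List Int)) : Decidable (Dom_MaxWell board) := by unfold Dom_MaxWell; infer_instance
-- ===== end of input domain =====

-- B drops A's unused coords dict and its per-empty-cell ColumnHeight rescan: it precomputes the
-- ten column heights once into a lookup table and counts well cells in one pass, with per-column
-- counters in a plain list.

-- shared total readers for xs[i] (A only reaches them in range under Pre_; B bounds-guards them)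
def pyRow (board : List (List Int)) (r : Int) : List Int := (PySem.List.pyGet? board r).getD []
def pyAt (row : List Int) (c : Int) : Int := (PySem.List.pyGet? row c).getD 0

-- ===== PORT A =====
def chLoop (board : List (List Int)) (col height : Int) : List Int → Int
  | [] => 0
  | x :: rest => if pyAt (pyRow board x) col ≠ 0 then height - x else chLoop board col height rest

def ColumnHeight (board : List (List Int)) (col : Int) : Int :=
  let height : Int := (board.length : Int) - 1
  chLoop board col height (PySem.List.pyRange 0 height 1)

def pvCellStep (board : List (List Int)) (height row : Int) (rowElements : List Int)
    (st : PySem.Dict Int Int × Int) (x : Int) : PySem.Dict Int Int × Int :=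
  if pyAt rowElements x = 0 then
    if x > 0 ∧ x < 9 then
      if (pyAt rowElements (x - 1) ≠ 0 ∧ pyAt rowElements (x + 1) ≠ 0) ∧
          ColumnHeight board x < height - row then
        (st.1.insert x (st.1.getD x 0 + 1), st.2 + 1)
      else st
    else if x = 0 then
      if pyAt rowElements (x + 1) ≠ 0 ∧ ColumnHeight board x < height - row then
        (st.1.insert x (st.1.getD x 0 + 1), st.2 + 1)
      else st
    else if x = 9 then
      if pyAt rowElements (x - 1) ≠ 0 ∧ ColumnHeight board x < height - row then
        (st.1.insert x (st.1.getD x 0 + 1), st.2 + 1)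
      else st
    else st
  else st

def MaxWell (board : List (List Int)) : Int :=
  let height : Int := (board.length : Int) - 1
  let _coords : PySem.Dict (Int × Int) Int :=
    (PySem.List.enumerate board).foldl (fun d p =>
      (PySem.List.pyRange 0 (p.2.length : Int) 1).foldl
        (fun d x => d.insert (x, p.1) (pyAt p.2 x)) d)
      (PySem.Dict.ofList [])
  let wellMap : PySem.Dict Int Int :=
    PySem.Dict.ofList [(0, 0), (1, 0), (2, 0), (3, 0), (4, 0), (5, 0), (6, 0), (7, 0), (8, 0), (9, 0)]
  let final :=
    (PySem.List.enumerate board).foldl (fun st p =>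
      (PySem.List.pyRange 0 (p.2.length : Int) 1).foldl (pvCellStep board height p.1 p.2) st)
      (wellMap, 0)
  (PySem.List.max? final.1.values (fun v => v)).getD 0

-- ===== PORT B =====
def bColScan (board : List (List Int)) (height c : Int) : List Int → Int
  | [] => 0
  | r :: rest =>
      if c < ((pyRow board r).length : Int) ∧ pyAt (pyRow board r) c ≠ 0 then height - r
      else bColScan board height c rest

def bCellStep (tops row : List Int) (height i : Int) (wells : List Int) (x : Int) : List Int :=
  if pyAt row x = 0 ∧ x ≤ 9 ∧ pyAt tops x < height - i then
    let ok : Bool :=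
      if x = 0 then decide (1 < (row.length : Int) ∧ pyAt row 1 ≠ 0)
      else if x = 9 then decide (pyAt row 8 ≠ 0)
      else decide (pyAt row (x - 1) ≠ 0 ∧ (x + 1 < (row.length : Int) ∧ pyAt row (x + 1) ≠ 0))
    if ok then PySem.List.pySetD wells x (pyAt wells x + 1) else wells
  else wells

def MaxWell_alt (board : List (List Int)) : Int :=
  let height : Int := (board.length : Int) - 1
  let tops : List Int := (PySem.List.pyRange 0 10 1).map
    (fun c => bColScan board height c (PySem.List.pyRange 0 height 1))
  let wells : List Int := PySem.List.pyRepeat [0] 10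
  let final :=
    (PySem.List.enumerate board).foldl (fun wells p =>
      (PySem.List.pyRange 0 (p.2.length : Int) 1).foldl (bCellStep tops p.2 height p.1) wells)
      wells
  (PySem.List.max? final (fun v => v)).getD 0

-- ===== PRECONDITION & SPEC =====
-- the neighbour test A performs at an empty cell of column x (edge columns need one neighbour)
def nbrOkB (row : List Int) (x : Int) : Bool :=
  if x = 0 then pyAt row 1 != 0
  else if x = 9 then pyAt row 8 != 0
  else pyAt row (x - 1) != 0 && pyAt row (x + 1) != 0

-- some empty cell of column c makes A call ColumnHeight(board, c)
def needsCH (board : List (List Int)) (c : Int) : Bool :=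
  board.any (fun row => decide (c < (row.length : Int)) && (pyAt row c == 0) && nbrOkB row c)

-- ColumnHeight(board, c)'s scan meets a non-empty cell before any too-short row
def safeCH (board : List (List Int)) (c : Int) : Bool :=
  (List.range (board.length - 1)).all (fun r =>
    if ((board[r]?.getD []).length : Int) ≤ c then
      (List.range r).any (fun r' => pyAt (board[r']?.getD []) c != 0)
    else true)

-- Pre_ is exactly the inputs on which A returns: it excludes boards with fewer than two rows
-- (A indexes board[1]), rows whose last cell is empty with a filled cell just before it at
-- column 1..8 (A then reads past the row's end), one-cell rows starting empty (A reads row[1]),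
-- and boards where a triggered ColumnHeight scan runs into a too-short row — on all of these A
-- raises IndexError.
def Pre_MaxWell (board : List (List Int)) : Prop :=
  2 ≤ board.length ∧
  (∀ row ∈ board,
    (row.length = 1 → pyAt row 0 ≠ 0) ∧
    (2 ≤ row.length → row.length ≤ 9 →
      ¬(pyAt row ((row.length : Int) - 1) = 0 ∧ pyAt row ((row.length : Int) - 2) ≠ 0))) ∧
  (∀ c ∈ ([0, 1, 2, 3, 4, 5, 6, 7, 8, 9] : List Int),
    needsCH board c = true → safeCH board c = true)
instance (board : List (List Int)) : Decidable (Pre_MaxWell board) := by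
  unfold Pre_MaxWell; infer_instance

def pvWitness_MaxWell : List (List Int) :=
  [[0, 0, 0, 0, 0, 0, 0, 0, 0, 0], [1, 0, 1, 1, 1, 1, 1, 1, 1, 1], [1, 1, 1, 1, 1, 1, 1, 1, 1, 1]]

def Spec_MaxWell (board : List (List Int)) (out : Int) : Prop := out = MaxWell_alt board
instance (board : List (List Int)) (out : Int) : Decidable (Spec_MaxWell board out) := by
  unfold Spec_MaxWell; infer_instance

-- ===== CLAIM (what is proved, stated in full; the proofs are below) =====
def Claim_equal_MaxWell : Prop :=
  ∀ (board : List (List Int)), Dom_MaxWell board → Pre_MaxWell board →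
    Spec_MaxWell board (MaxWell board)

-- ===== LEMMAS AND PROOFS =====

theorem pyAt_oob (row : List Int) (c : Int) (h0 : 0 ≤ c) (hl : (row.length : Int) ≤ c) :
    pyAt row c = 0 := by
  simp [pyAt, PySem.List.pyGet?, PySem.List.pyIdx?, h0,
    show ¬ c < (row.length : Int) from not_lt.2 hl]

-- A's per-cell condition, as one boolean
def condA (board : List (List Int)) (h i : Int) (row : List Int) (c : Int) : Bool :=
  if pyAt row c = 0 then
    if c > 0 ∧ c < 9 then
      decide ((pyAt row (c - 1) ≠ 0 ∧ pyAt row (c + 1) ≠ 0) ∧ ColumnHeight board c < h - i)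
    else if c = 0 then decide (pyAt row (c + 1) ≠ 0 ∧ ColumnHeight board c < h - i)
    else if c = 9 then decide (pyAt row (c - 1) ≠ 0 ∧ ColumnHeight board c < h - i)
    else false
  else false

theorem cellStep_eq (board : List (List Int)) (h i : Int) (row : List Int)
    (st : PySem.Dict Int Int × Int) (x : Int) :
    pvCellStep board h i row st x =
      if condA board h i row x then (st.1.insert x (st.1.getD x 0 + 1), st.2 + 1) else st := by
  unfold pvCellStep condA
  by_cases h0 : pyAt row x = 0
  · by_cases hm : x > 0 ∧ x < 9
    · by_cases hc : (pyAt row (x - 1) ≠ 0 ∧ pyAt row (x + 1) ≠ 0) ∧ ColumnHeight board x < h - i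
      · simp [h0, hm, hc]
      · simp [h0, hm, hc]
    · by_cases h00 : x = 0
      · subst h00
        by_cases hc : pyAt row (0 + 1) ≠ 0 ∧ ColumnHeight board 0 < h - i
        · simp [h0, hc]
        · simp [h0]
      · by_cases h99 : x = 9
        · subst h99
          by_cases hc : pyAt row (9 - 1) ≠ 0 ∧ ColumnHeight board 9 < h - i
          · simp [h0, h00, hc]
          · simp [h0, h00]
        · simp [h0, hm, h00, h99]
  · simp [h0]

theorem condA_bounds (board : List (List Int)) (h i : Int) (row : List Int) (c : Int)
    (hc : condA board h i row c = true) : 0 ≤ c ∧ c < 10 := by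
  unfold condA at hc
  split_ifs at hc <;> omega

theorem inner_fold (board : List (List Int)) (h i : Int) (row : List Int) (c : Int) :
    ∀ (xs : List Int) (st : PySem.Dict Int Int × Int), xs.Nodup →
      (∀ x : Int, 0 ≤ x → x < 10 → x ∈ st.1.keys) →
      ((xs.foldl (pvCellStep board h i row) st).1.keys = st.1.keys ∧
       (xs.foldl (pvCellStep board h i row) st).1.getD c 0 =
         st.1.getD c 0 + (if c ∈ xs ∧ condA board h i row c = true then 1 else 0))
  | [], st, _, _ => by simp
  | x :: rest, st, hnd, hK => by
    rw [List.foldl_cons, cellStep_eq]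
    rcases List.nodup_cons.mp hnd with ⟨hxr, hndr⟩
    by_cases hx : condA board h i row x = true
    · rw [if_pos hx]
      have hb := condA_bounds board h i row x hx
      have hcont : st.1.contains x = true :=
        (PySem.Dict.contains_iff_mem_keys st.1 x).mpr (hK x hb.1 hb.2)
      have hkeys' : (st.1.insert x (st.1.getD x 0 + 1)).keys = st.1.keys :=
        PySem.Dict.keys_insert_of_contains st.1 _ hcont
      have hK' : ∀ y : Int, 0 ≤ y → y < 10 →
          y ∈ ((st.1.insert x (st.1.getD x 0 + 1), st.2 + 1) :
            PySem.Dict Int Int × Int).1.keys := by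
        intro y hy1 hy2; simpa [hkeys'] using hK y hy1 hy2
      obtain ⟨ihk, ihg⟩ := inner_fold board h i row c rest _ hndr hK'
      refine ⟨by rw [ihk]; exact hkeys', ?_⟩
      rw [ihg]
      have hgd : (st.1.insert x (st.1.getD x 0 + 1)).getD c 0 =
          if c = x then st.1.getD x 0 + 1 else st.1.getD c 0 :=
        PySem.Dict.getD_insert st.1 x c _ 0
      by_cases hcx : c = x
      · subst hcx
        simp [hgd, hxr, hx]
      · simp [hgd, hcx, List.mem_cons]
    · rw [if_neg hx]
      obtain ⟨ihk, ihg⟩ := inner_fold board h i row c rest st hndr hK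
      refine ⟨ihk, ?_⟩
      rw [ihg]
      by_cases hcx : c = x
      · subst hcx; simp [hx]
      · simp [hcx, List.mem_cons]

-- the per-cell count predicate both loops are measured by
def cellPred (board : List (List Int)) (h c : Int) (i : Int) : Bool :=
  decide (c < ((pyRow board i).length : Int)) && condA board h i (pyRow board i) c

-- A's outer loop over row indices a..len-1: keys preserved, wellMap[c] counts cellPred
theorem outer_fold (board : List (List Int)) (h c : Int)
    (hc0 : 0 ≤ c) (hc9 : c < 10) :
    ∀ (n : Nat) (a : Int) (st : PySem.Dict Int Int × Int), 0 ≤ a →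
      a + n = (board.length : Int) →
      (∀ x : Int, 0 ≤ x → x < 10 → x ∈ st.1.keys) →
      ((((PySem.List.pyRange a (board.length : Int) 1).foldl (fun st i =>
          (PySem.List.pyRange 0 ((pyRow board i).length : Int) 1).foldl
            (pvCellStep board h i (pyRow board i)) st) st).1.keys = st.1.keys) ∧
       (((PySem.List.pyRange a (board.length : Int) 1).foldl (fun st i =>
          (PySem.List.pyRange 0 ((pyRow board i).length : Int) 1).foldl
            (pvCellStep board h i (pyRow board i)) st) st).1.getD c 0 =
         st.1.getD c 0 +
           ((PySem.List.pyRange a (board.length : Int) 1).countP (cellPred board h c) : Int))) := by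
  intro n
  induction n with
  | zero =>
    intro a st ha hn hK
    rw [PySem.List.pyRange_one_eq_nil (by omega)]
    simp
  | succ m ih =>
    intro a st ha hn hK
    rw [PySem.List.pyRange_one_cons (by omega), List.foldl_cons, List.countP_cons]
    obtain ⟨ik, ig⟩ := inner_fold board h a (pyRow board a) c
      (PySem.List.pyRange 0 ((pyRow board a).length : Int) 1) st
      (PySem.List.nodup_pyRange_one 0 _) hK
    have hK1 : ∀ x : Int, 0 ≤ x → x < 10 →
        x ∈ ((PySem.List.pyRange 0 ((pyRow board a).length : Int) 1).foldl
          (pvCellStep board h a (pyRow board a)) st).1.keys := by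
      intro x hx1 hx2; rw [ik]; exact hK x hx1 hx2
    obtain ⟨ok, og⟩ := ih (a + 1) _ (by omega) (by omega) hK1
    refine ⟨by rw [ok, ik], ?_⟩
    rw [og, ig]
    have hmem : c ∈ PySem.List.pyRange 0 ((pyRow board a).length : Int) 1 ↔
        c < ((pyRow board a).length : Int) := by
      rw [PySem.List.mem_pyRange_one]; omega
    unfold cellPred
    by_cases hcr : c < ((pyRow board a).length : Int)
    · by_cases hca : condA board h a (pyRow board a) c = true
      · simp [hmem, hcr, hca]; ring
      · simp [hmem, hcr, hca]
    · simp [hmem, hcr]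

-- B's column scan computes exactly ColumnHeight's loop (an out-of-range read is 0)
theorem bColScan_eq_chLoop (board : List (List Int)) (h c : Int) (hc0 : 0 ≤ c) :
    ∀ l : List Int, bColScan board h c l = chLoop board c h l := by
  intro l
  induction l with
  | nil => simp [bColScan, chLoop]
  | cons r rest ih =>
    unfold bColScan chLoop
    by_cases hx : pyAt (pyRow board r) c ≠ 0
    · have hin : c < ((pyRow board r).length : Int) := by
        by_contra hle
        exact hx (pyAt_oob _ c hc0 (by omega))
      simp [hx, hin]
    · simp [hx, ih]

-- B's per-cell condition, as one boolean
def condB (tops row : List Int) (h i x : Int) : Bool :=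
  if pyAt row x = 0 ∧ x ≤ 9 ∧ pyAt tops x < h - i then
    if x = 0 then decide (1 < (row.length : Int) ∧ pyAt row 1 ≠ 0)
    else if x = 9 then decide (pyAt row 8 ≠ 0)
    else decide (pyAt row (x - 1) ≠ 0 ∧ (x + 1 < (row.length : Int) ∧ pyAt row (x + 1) ≠ 0))
  else false

theorem bCellStep_eq (tops row : List Int) (h i : Int) (wells : List Int) (x : Int) :
    bCellStep tops row h i wells x =
      if condB tops row h i x then PySem.List.pySetD wells x (pyAt wells x + 1) else wells := by
  unfold bCellStep condB
  by_cases h1 : pyAt row x = 0 ∧ x ≤ 9 ∧ pyAt tops x < h - i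
  · rw [if_pos h1, if_pos h1]
  · rw [if_neg h1, if_neg h1]
    simp

-- the tops table entry is ColumnHeight
theorem tops_eq (board : List (List Int)) (x : Int) (h0 : 0 ≤ x) (h9 : x < 10) :
    pyAt ((PySem.List.pyRange 0 10 1).map
      (fun c => bColScan board ((board.length : Int) - 1) c
        (PySem.List.pyRange 0 ((board.length : Int) - 1) 1))) x = ColumnHeight board x := by
  have := PySem.List.pyGetD_map_pyRange_of_nonneg
    (fun c => bColScan board ((board.length : Int) - 1) c
      (PySem.List.pyRange 0 ((board.length : Int) - 1) 1)) 10 x 0 h0 h9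
  have h2 : pyAt ((PySem.List.pyRange 0 10 1).map
      (fun c => bColScan board ((board.length : Int) - 1) c
        (PySem.List.pyRange 0 ((board.length : Int) - 1) 1))) x =
      bColScan board ((board.length : Int) - 1) x
        (PySem.List.pyRange 0 ((board.length : Int) - 1) 1) := this
  rw [h2, bColScan_eq_chLoop board _ x h0]
  rfl

-- B's cell condition agrees with A's on the cells B visits
theorem condAB (board : List (List Int)) (i x : Int) (hx0 : 0 ≤ x) (row : List Int) :
    condB ((PySem.List.pyRange 0 10 1).map
        (fun c => bColScan board ((board.length : Int) - 1) c
          (PySem.List.pyRange 0 ((board.length : Int) - 1) 1))) row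
        ((board.length : Int) - 1) i x =
      condA board ((board.length : Int) - 1) i row x := by
  have g1 : pyAt row 1 ≠ 0 → 1 < (row.length : Int) := fun hne => by
    by_contra hle; exact hne (pyAt_oob row 1 (by omega) (by omega))
  have g2 : pyAt row (x + 1) ≠ 0 → x + 1 < (row.length : Int) := fun hne => by
    by_contra hle; exact hne (pyAt_oob row (x + 1) (by omega) (by omega))
  unfold condB condA
  by_cases hz : pyAt row x = 0
  · by_cases h00 : x = 0
    · subst h00
      rw [tops_eq board 0 (by omega) (by omega)]
      simp only [hz, true_and, show ¬((0:Int) > 0 ∧ (0:Int) < 9) from by omega, if_false,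
        if_pos rfl, show ((0:Int) ≤ 9) from by omega, true_and]
      rw [Bool.eq_iff_iff]
      by_cases hch : ColumnHeight board 0 < (board.length : Int) - 1 - i
      · simp [hch]
        intro hne
        exact_mod_cast g1 hne
      · simp [hch]
    · by_cases h99 : x = 9
      · subst h99
        rw [tops_eq board 9 (by omega) (by omega)]
        simp only [hz, true_and, show ¬((9:Int) > 0 ∧ (9:Int) < 9) from by omega, if_false,
          show (9:Int) ≠ 0 from by omega, show ((9:Int) ≤ 9) from by omega, true_and,
          if_pos rfl]
        rw [Bool.eq_iff_iff]
        by_cases hch : ColumnHeight board 9 < (board.length : Int) - 1 - i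
        · simp [hch]
        · simp [hch]
      · by_cases hlt : x ≤ 9
        · have hmid : x > 0 ∧ x < 9 := by omega
          rw [tops_eq board x (by omega) (by omega)]
          simp only [hz, true_and, hmid, if_pos, hlt, h00, h99, if_false]
          rw [Bool.eq_iff_iff]
          by_cases hch : ColumnHeight board x < (board.length : Int) - 1 - i
          · simp [hch]
            intro _ hne
            exact_mod_cast g2 hne
          · simp [hch]
        · simp only [hz, true_and, show ¬(x > 0 ∧ x < 9) from by omega, if_false, h00, h99,
            hlt, false_and, and_false]
          simp [hlt]
  · simp [hz]

theorem condB_bounds (tops row : List Int) (h i x : Int)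
    (hc : condB tops row h i x = true) : x ≤ 9 := by
  unfold condB at hc
  split_ifs at hc <;> omega

theorem inner_foldB (tops row : List Int) (h i : Int) (c : Nat) (hc : c < 10) :
    ∀ (xs : List Int) (wells : List Int), xs.Nodup → (∀ x ∈ xs, 0 ≤ x) →
      wells.length = 10 →
      ((xs.foldl (bCellStep tops row h i) wells).length = 10 ∧
       pyAt (xs.foldl (bCellStep tops row h i) wells) (c : Int) =
         pyAt wells (c : Int) +
           (if (c : Int) ∈ xs ∧ condB tops row h i (c : Int) = true then 1 else 0))
  | [], wells, _, _, hw => by simp [hw]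
  | x :: rest, wells, hnd, hpos, hw => by
    rw [List.foldl_cons, bCellStep_eq]
    rcases List.nodup_cons.mp hnd with ⟨hxr, hndr⟩
    have hx0 : 0 ≤ x := hpos x (List.mem_cons_self)
    by_cases hx : condB tops row h i x = true
    · rw [if_pos hx]
      have hx9 : x ≤ 9 := condB_bounds tops row h i x hx
      have hxn : x = ((x.toNat : Nat) : Int) := by omega
      have hlen : (PySem.List.pySetD wells x (pyAt wells x + 1)).length = 10 := by
        rw [PySem.List.length_pySetD, hw]
      obtain ⟨ihl, ihg⟩ := inner_foldB tops row h i c hc rest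
        (PySem.List.pySetD wells x (pyAt wells x + 1)) hndr
        (fun y hy => hpos y (List.mem_cons_of_mem x hy)) hlen
      refine ⟨ihl, ?_⟩
      rw [ihg]
      have hset : pyAt (PySem.List.pySetD wells x (pyAt wells x + 1)) (c : Int) =
          if c = x.toNat then pyAt wells x + 1 else pyAt wells (c : Int) := by
        rw [hxn]
        exact PySem.List.pyGetD_pySetD_natCast wells x.toNat c _ 0 (by omega)
      by_cases hcx : c = x.toNat
      · have hcx' : (c : Int) = x := by omega
        simp only [hset, if_pos hcx]
        rw [hcx']
        simp [hxr, hx]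
      · have hcx' : ¬ (c : Int) = x := by omega
        simp only [hset, if_neg hcx]
        simp [hcx', List.mem_cons]
    · rw [if_neg hx]
      obtain ⟨ihl, ihg⟩ := inner_foldB tops row h i c hc rest wells hndr
        (fun y hy => hpos y (List.mem_cons_of_mem x hy)) hw
      refine ⟨ihl, ?_⟩
      rw [ihg]
      by_cases hcx : (c : Int) = x
      · rw [← hcx] at hx; simp [hx]
      · simp [hcx, List.mem_cons]

-- B's outer loop: counters keep length 10 and count cellPred per column
theorem outer_foldB (board : List (List Int)) (tops : List Int)
    (htops : tops = (PySem.List.pyRange 0 10 1).map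
      (fun c2 => bColScan board ((board.length : Int) - 1) c2
        (PySem.List.pyRange 0 ((board.length : Int) - 1) 1)))
    (c : Nat) (hc : c < 10) :
    ∀ (n : Nat) (a : Int) (wells : List Int), 0 ≤ a →
      a + n = (board.length : Int) → wells.length = 10 →
      (((PySem.List.pyRange a (board.length : Int) 1).foldl (fun wells i =>
          (PySem.List.pyRange 0 ((pyRow board i).length : Int) 1).foldl
            (bCellStep tops (pyRow board i) ((board.length : Int) - 1) i) wells) wells).length = 10 ∧
       pyAt ((PySem.List.pyRange a (board.length : Int) 1).foldl (fun wells i =>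
          (PySem.List.pyRange 0 ((pyRow board i).length : Int) 1).foldl
            (bCellStep tops (pyRow board i) ((board.length : Int) - 1) i) wells) wells) (c : Int) =
         pyAt wells (c : Int) +
           ((PySem.List.pyRange a (board.length : Int) 1).countP
             (cellPred board ((board.length : Int) - 1) (c : Int)) : Int)) := by
  intro n
  induction n with
  | zero =>
    intro a wells ha hn hw
    rw [PySem.List.pyRange_one_eq_nil (by omega)]
    simp [hw]
  | succ m ih =>
    intro a wells ha hn hw
    rw [PySem.List.pyRange_one_cons (by omega), List.foldl_cons, List.countP_cons]
    obtain ⟨il, ig⟩ := inner_foldB tops (pyRow board a) ((board.length : Int) - 1) a c hc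
      (PySem.List.pyRange 0 ((pyRow board a).length : Int) 1) wells
      (PySem.List.nodup_pyRange_one 0 _)
      (fun y hy => ((PySem.List.mem_pyRange_one).mp hy).1) hw
    obtain ⟨ol, og⟩ := ih (a + 1) _ (by omega) (by omega) il
    refine ⟨ol, ?_⟩
    rw [og, ig, htops, condAB board a (c : Int) (by omega) (pyRow board a)]
    have hmem : (c : Int) ∈ PySem.List.pyRange 0 ((pyRow board a).length : Int) 1 ↔
        (c : Int) < ((pyRow board a).length : Int) := by
      rw [PySem.List.mem_pyRange_one]; omega
    unfold cellPred
    by_cases hcr : (c : Int) < ((pyRow board a).length : Int)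
    · by_cases hca : condA board ((board.length : Int) - 1) a (pyRow board a) (c : Int) = true
      · simp [hmem, hcr, hca]; ring
      · simp [hmem, hcr, hca]
    · simp [hmem, hcr]

theorem pyRow_def (board : List (List Int)) (r : Int) :
    PySem.List.pyGetD board r [] = pyRow board r := rfl

def mCount (board : List (List Int)) (c : Int) : Int :=
  ((PySem.List.pyRange 0 (board.length : Int) 1).countP
    (cellPred board ((board.length : Int) - 1) c) : Int)

theorem A_eval (board : List (List Int)) :
    MaxWell board =
      [mCount board 1, mCount board 2, mCount board 3, mCount board 4, mCount board 5,
       mCount board 6, mCount board 7, mCount board 8, mCount board 9].foldl max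
        (mCount board 0) := by
  simp only [MaxWell]
  rw [PySem.List.enumerate_eq_map_pyRange board []]
  simp only [List.foldl_map, pyRow_def, PySem.List.len_eq]
  have hKinit : ∀ x : Int, 0 ≤ x → x < 10 →
      x ∈ ((PySem.Dict.ofList
        [((0:Int), (0:Int)), (1, 0), (2, 0), (3, 0), (4, 0), (5, 0), (6, 0), (7, 0), (8, 0), (9, 0)],
        (0:Int)) : PySem.Dict Int Int × Int).1.keys := by
    intro x h1 h2
    have hk : (PySem.Dict.ofList
        [((0:Int), (0:Int)), (1, 0), (2, 0), (3, 0), (4, 0), (5, 0), (6, 0), (7, 0), (8, 0), (9, 0)]).keys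
        = [0, 1, 2, 3, 4, 5, 6, 7, 8, 9] := by decide
    rw [hk]; simp; omega
  have hout : ∀ c : Int, 0 ≤ c → c < 10 →
      ((((PySem.List.pyRange 0 (board.length : Int) 1).foldl (fun st i =>
          (PySem.List.pyRange 0 ((pyRow board i).length : Int) 1).foldl
            (pvCellStep board ((board.length : Int) - 1) i (pyRow board i)) st)
          (PySem.Dict.ofList
            [((0:Int), (0:Int)), (1, 0), (2, 0), (3, 0), (4, 0), (5, 0), (6, 0), (7, 0), (8, 0), (9, 0)],
           (0:Int))).1.keys =
        (PySem.Dict.ofList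
          [((0:Int), (0:Int)), (1, 0), (2, 0), (3, 0), (4, 0), (5, 0), (6, 0), (7, 0), (8, 0), (9, 0)]).keys) ∧
       (((PySem.List.pyRange 0 (board.length : Int) 1).foldl (fun st i =>
          (PySem.List.pyRange 0 ((pyRow board i).length : Int) 1).foldl
            (pvCellStep board ((board.length : Int) - 1) i (pyRow board i)) st)
          (PySem.Dict.ofList
            [((0:Int), (0:Int)), (1, 0), (2, 0), (3, 0), (4, 0), (5, 0), (6, 0), (7, 0), (8, 0), (9, 0)],
           (0:Int))).1.getD c 0 = mCount board c)) := by
    intro c hc0 hc9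
    obtain ⟨hk, hg⟩ := outer_fold board ((board.length : Int) - 1) c hc0 hc9
      board.length 0 _ (by omega) (by omega) hKinit
    refine ⟨hk, ?_⟩
    rw [hg]
    have : (PySem.Dict.ofList
        [((0:Int), (0:Int)), (1, 0), (2, 0), (3, 0), (4, 0), (5, 0), (6, 0), (7, 0), (8, 0), (9, 0)]).getD c 0
        = 0 := by
      interval_cases c <;> decide
    rw [this, zero_add]
    rfl
  have hkeys := (hout 0 (by norm_num) (by norm_num)).1
  have hnd : (((PySem.List.pyRange 0 (board.length : Int) 1).foldl (fun st i =>
          (PySem.List.pyRange 0 ((pyRow board i).length : Int) 1).foldl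
            (pvCellStep board ((board.length : Int) - 1) i (pyRow board i)) st)
          (PySem.Dict.ofList
            [((0:Int), (0:Int)), (1, 0), (2, 0), (3, 0), (4, 0), (5, 0), (6, 0), (7, 0), (8, 0), (9, 0)],
           (0:Int))).1.keys).Nodup := by
    rw [hkeys]; decide
  rw [PySem.Dict.values_eq_map_keys _ hnd 0, hkeys]
  have hk10 : (PySem.Dict.ofList
      [((0:Int), (0:Int)), (1, 0), (2, 0), (3, 0), (4, 0), (5, 0), (6, 0), (7, 0), (8, 0), (9, 0)]).keys
      = [0, 1, 2, 3, 4, 5, 6, 7, 8, 9] := by decide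
  rw [hk10]
  simp only [List.map_cons, List.map_nil]
  rw [(hout 0 (by norm_num) (by norm_num)).2, (hout 1 (by norm_num) (by norm_num)).2,
      (hout 2 (by norm_num) (by norm_num)).2, (hout 3 (by norm_num) (by norm_num)).2,
      (hout 4 (by norm_num) (by norm_num)).2, (hout 5 (by norm_num) (by norm_num)).2,
      (hout 6 (by norm_num) (by norm_num)).2, (hout 7 (by norm_num) (by norm_num)).2,
      (hout 8 (by norm_num) (by norm_num)).2, (hout 9 (by norm_num) (by norm_num)).2]
  rw [PySem.List.max?_id_cons]
  rfl

theorem pyAt_rep_zero (c : Int) : pyAt (PySem.List.pyRepeat [(0:Int)] 10) c = 0 := by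
  have hrep : PySem.List.pyRepeat [(0:Int)] 10 = List.replicate 10 0 := by decide
  rw [pyAt, hrep]
  rcases h : PySem.List.pyGet? (List.replicate 10 (0:Int)) c with _ | v
  · rfl
  · simp only [PySem.List.pyGet?, Option.bind_eq_some_iff] at h
    obtain ⟨k, -, hk⟩ := h
    have hv := List.mem_of_getElem? hk
    simp [List.eq_of_mem_replicate hv]

theorem B_eval (board : List (List Int)) :
    MaxWell_alt board =
      [mCount board 1, mCount board 2, mCount board 3, mCount board 4, mCount board 5,
       mCount board 6, mCount board 7, mCount board 8, mCount board 9].foldl max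
        (mCount board 0) := by
  simp only [MaxWell_alt]
  rw [PySem.List.enumerate_eq_map_pyRange board []]
  simp only [List.foldl_map, pyRow_def, PySem.List.len_eq]
  have hw0 : (PySem.List.pyRepeat [(0:Int)] 10).length = 10 := by decide
  have hout : ∀ c : Nat, c < 10 →
      (((PySem.List.pyRange 0 (board.length : Int) 1).foldl (fun wells i =>
          (PySem.List.pyRange 0 ((pyRow board i).length : Int) 1).foldl
            (bCellStep ((PySem.List.pyRange 0 10 1).map
              (fun c2 => bColScan board ((board.length : Int) - 1) c2
                (PySem.List.pyRange 0 ((board.length : Int) - 1) 1)))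
              (pyRow board i) ((board.length : Int) - 1) i) wells)
          (PySem.List.pyRepeat [(0:Int)] 10)).length = 10 ∧
       pyAt ((PySem.List.pyRange 0 (board.length : Int) 1).foldl (fun wells i =>
          (PySem.List.pyRange 0 ((pyRow board i).length : Int) 1).foldl
            (bCellStep ((PySem.List.pyRange 0 10 1).map
              (fun c2 => bColScan board ((board.length : Int) - 1) c2
                (PySem.List.pyRange 0 ((board.length : Int) - 1) 1)))
              (pyRow board i) ((board.length : Int) - 1) i) wells)
          (PySem.List.pyRepeat [(0:Int)] 10)) (c : Int) = mCount board (c : Int)) := by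
    intro c hc
    obtain ⟨hl, hg⟩ := outer_foldB board _ rfl c hc board.length 0
      (PySem.List.pyRepeat [(0:Int)] 10) (by omega) (by omega) hw0
    refine ⟨hl, ?_⟩
    rw [hg, pyAt_rep_zero, zero_add]
    rfl
  have hfin : ((PySem.List.pyRange 0 (board.length : Int) 1).foldl (fun wells i =>
          (PySem.List.pyRange 0 ((pyRow board i).length : Int) 1).foldl
            (bCellStep ((PySem.List.pyRange 0 10 1).map
              (fun c2 => bColScan board ((board.length : Int) - 1) c2
                (PySem.List.pyRange 0 ((board.length : Int) - 1) 1)))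
              (pyRow board i) ((board.length : Int) - 1) i) wells)
          (PySem.List.pyRepeat [(0:Int)] 10)) =
      [mCount board 0, mCount board 1, mCount board 2, mCount board 3, mCount board 4,
       mCount board 5, mCount board 6, mCount board 7, mCount board 8, mCount board 9] := by
    apply List.ext_getElem
    · rw [(hout 0 (by norm_num)).1]; rfl
    · intro k hk1 hk2
      have hlen := (hout 0 (by norm_num)).1
      have hk10 : k < 10 := by omega
      have hval := (hout k hk10).2
      have hpy : pyAt ((PySem.List.pyRange 0 (board.length : Int) 1).foldl (fun wells i =>
          (PySem.List.pyRange 0 ((pyRow board i).length : Int) 1).foldl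
            (bCellStep ((PySem.List.pyRange 0 10 1).map
              (fun c2 => bColScan board ((board.length : Int) - 1) c2
                (PySem.List.pyRange 0 ((board.length : Int) - 1) 1)))
              (pyRow board i) ((board.length : Int) - 1) i) wells)
          (PySem.List.pyRepeat [(0:Int)] 10)) (k : Int) =
          ((PySem.List.pyRange 0 (board.length : Int) 1).foldl (fun wells i =>
          (PySem.List.pyRange 0 ((pyRow board i).length : Int) 1).foldl
            (bCellStep ((PySem.List.pyRange 0 10 1).map
              (fun c2 => bColScan board ((board.length : Int) - 1) c2
                (PySem.List.pyRange 0 ((board.length : Int) - 1) 1)))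
              (pyRow board i) ((board.length : Int) - 1) i) wells)
          (PySem.List.pyRepeat [(0:Int)] 10))[k] := by
        show PySem.List.pyGetD _ ((k : Nat) : Int) 0 = _
        rw [PySem.List.pyGetD_natCast]
        exact List.getD_eq_getElem _ 0 hk1
      rw [← hpy, hval]
      interval_cases k <;> rfl
  rw [hfin, PySem.List.max?_id_cons]
  rfl

-- ===== VERDICT (by name: the statement is the Claim_ definition above) =====
theorem MaxWell_spec : Claim_equal_MaxWell := by
  unfold Claim_equal_MaxWell
  intro board _hd _hpre
  unfold Spec_MaxWell
  rw [A_eval board, B_eval board]
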